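-- pv_equiv track=rewrite | github.com/mxlilly-ship-it/friday-night-dynasty | backend/services/league_service.py | _improvement_pp_delta
-- ===== SOURCE A (Python) =====
-- def _improvement_pp_delta(from_level: int, to_level: int) -> int:
--     """
--     Compute PP delta for moving a single program grade between levels.
--     Upgrades cost PP; downgrades refund PP.
--
--     Cost pattern: 1→2 = 20, 2→3 = 40, ..., 9→10 = 180 (20 * current level).
--     """
--     a = max(1, min(10, int(from_level or 1)))
--     b = max(1, min(10, int(to_level or 1)))
--     if b == a:
--         return 0
--     if b > a:
--         cost = sum(20 * k for k in range(a, b))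
--         return -int(cost)
--     refund = sum(20 * k for k in range(b, a))
--     return int(refund)
-- ===== SOURCE B (Python) =====
-- def _improvement_pp_delta(from_level: int, to_level: int) -> int:
--     # Closed form of the arithmetic series: sum(20*k for k in range(a,b)) = 10*(a+b-1)*(b-a)
--     a = max(1, min(10, int(from_level or 1)))
--     b = max(1, min(10, int(to_level or 1)))
--     return -10 * (a + b - 1) * (b - a)
-- ===== Notes on version B (the rewrite author's own statement) =====
-- stated objective: simpler
-- what changed: Replaced the branch on upgrade/downgrade and the generator-sum over range(a,b) with the single closed-form arithmetic-series expression -10*(a+b-1)*(b-a).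
import Mathlib
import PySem

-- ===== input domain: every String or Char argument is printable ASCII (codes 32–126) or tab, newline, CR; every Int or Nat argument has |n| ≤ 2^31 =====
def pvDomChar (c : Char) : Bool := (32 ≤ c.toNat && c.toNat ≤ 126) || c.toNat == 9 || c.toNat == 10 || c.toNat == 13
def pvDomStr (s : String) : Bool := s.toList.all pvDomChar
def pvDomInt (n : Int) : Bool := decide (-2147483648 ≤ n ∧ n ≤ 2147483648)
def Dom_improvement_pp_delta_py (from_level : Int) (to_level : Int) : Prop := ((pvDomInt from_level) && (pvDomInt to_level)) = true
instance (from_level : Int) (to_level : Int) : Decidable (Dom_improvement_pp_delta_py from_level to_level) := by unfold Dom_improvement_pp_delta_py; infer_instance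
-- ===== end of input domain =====

-- B replaces A's branch-and-sum over range(a,b) with the closed-form series value -10*(a+b-1)*(b-a): simpler.

-- ===== PORT A =====
def improvement_pp_delta_py (from_level : Int) (to_level : Int) : Int :=
  -- a = max(1, min(10, int(from_level or 1)))  ('x or 1' on an int is 1 exactly when x == 0)
  let a : Int := max 1 (min 10 (if from_level = 0 then 1 else from_level))
  let b : Int := max 1 (min 10 (if to_level = 0 then 1 else to_level))
  if b = a then 0
  else if b > a then
    -- cost = sum(20 * k for k in range(a, b)); return -int(cost)
    -((PySem.List.pyRange a b 1).foldl (fun s k => s + 20 * k) 0)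
  else
    -- refund = sum(20 * k for k in range(b, a)); return int(refund)
    (PySem.List.pyRange b a 1).foldl (fun s k => s + 20 * k) 0

-- ===== PORT B =====
def improvement_pp_delta_py_alt (from_level : Int) (to_level : Int) : Int :=
  let a : Int := max 1 (min 10 (if from_level = 0 then 1 else from_level))
  let b : Int := max 1 (min 10 (if to_level = 0 then 1 else to_level))
  (-10) * (a + b - 1) * (b - a)

-- ===== PRECONDITION & SPEC =====
def Spec_improvement_pp_delta_py (from_level : Int) (to_level : Int) (out : Int) : Prop := out = improvement_pp_delta_py_alt from_level to_level
instance (from_level : Int) (to_level : Int) (out : Int) : Decidable (Spec_improvement_pp_delta_py from_level to_level out) := by unfold Spec_improvement_pp_delta_py; infer_instance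

-- ===== CLAIM (what is proved, stated in full; the proofs are below) =====
def Claim_equal_improvement_pp_delta_py : Prop := ∀ (from_level : Int) (to_level : Int), Dom_improvement_pp_delta_py from_level to_level → Spec_improvement_pp_delta_py from_level to_level (improvement_pp_delta_py from_level to_level)

-- ===== LEMMAS AND PROOFS =====

-- Both ports clamp to [1,10]; on that finite square equality is checked by decide.
theorem pv_core (a b : Int) (ha1 : 1 ≤ a) (ha2 : a ≤ 10) (hb1 : 1 ≤ b) (hb2 : b ≤ 10) :
    (if b = a then (0:Int)
     else if b > a then -((PySem.List.pyRange a b 1).foldl (fun s k => s + 20 * k) 0)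
     else (PySem.List.pyRange b a 1).foldl (fun s k => s + 20 * k) 0)
    = -10 * (a + b - 1) * (b - a) := by
  interval_cases a <;> interval_cases b <;> decide

theorem pv_clamp_bounds (x : Int) :
    1 ≤ max 1 (min 10 (if x = 0 then 1 else x)) ∧ max 1 (min 10 (if x = 0 then 1 else x)) ≤ 10 := by
  constructor
  · exact le_max_left _ _
  · apply max_le <;> [omega; exact min_le_left _ _]

-- ===== VERDICT (by name: the statement is the Claim_ definition above) =====
theorem improvement_pp_delta_py_spec : Claim_equal_improvement_pp_delta_py := by
  intro from_level to_level _
  unfold Spec_improvement_pp_delta_py improvement_pp_delta_py improvement_pp_delta_py_alt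
  have ha := pv_clamp_bounds from_level
  have hb := pv_clamp_bounds to_level
  exact pv_core _ _ ha.1 ha.2 hb.1 hb.2
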